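-- pv_equiv track=rewrite | github.com/jfeser/earley | java_testing/remove_epsilons.py | recursive_nulls
-- ===== SOURCE A (Python) =====
-- def recursive_nulls(rhs, nullable):
-- 	if len(rhs) == 0:
-- 		yield []
-- 		return
-- 	symbol = rhs[0]
-- 	if symbol in nullable:
-- 		for next_rhs in recursive_nulls(rhs[1:], nullable):
-- 			yield [symbol] + next_rhs
-- 			yield next_rhs
-- 	else:
-- 		for next_rhs in recursive_nulls(rhs[1:], nullable):
-- 			yield [symbol] + next_rhs
-- ===== SOURCE B (Python) =====
-- def recursive_nulls(rhs, nullable):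
--     results = [[]]
--     for symbol in reversed(rhs):
--         new_results = []
--         for r in results:
--             new_results.append([symbol] + r)
--             if symbol in nullable:
--                 new_results.append(r)
--         results = new_results
--     yield from results
-- ===== Notes on version B (the rewrite author's own statement) =====
-- stated objective: alternative
-- what changed: Replaces front-to-back recursion with generator interleaving by a bottom-up iterative accumulation: fold over reversed(rhs) building the full list of deletion variants, then yield them.
import Mathlib
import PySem

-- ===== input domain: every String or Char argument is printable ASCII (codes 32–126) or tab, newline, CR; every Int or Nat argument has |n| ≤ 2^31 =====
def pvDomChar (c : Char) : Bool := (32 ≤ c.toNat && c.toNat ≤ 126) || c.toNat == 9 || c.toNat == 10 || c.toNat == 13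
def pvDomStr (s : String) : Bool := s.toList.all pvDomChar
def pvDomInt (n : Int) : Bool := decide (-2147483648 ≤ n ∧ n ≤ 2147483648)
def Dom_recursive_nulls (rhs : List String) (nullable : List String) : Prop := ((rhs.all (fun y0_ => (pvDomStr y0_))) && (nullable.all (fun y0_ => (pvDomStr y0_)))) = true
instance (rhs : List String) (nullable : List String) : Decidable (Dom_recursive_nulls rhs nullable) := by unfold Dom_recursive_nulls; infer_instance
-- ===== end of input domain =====

-- ===== PORT A =====
-- B: iterative bottom-up accumulation over reversed rhs instead of A's front-to-back recursion; same values, same order.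
def recursive_nulls (rhs : List String) (nullable : List String) : List (List String) :=
  match rhs with
  | [] => [[]]
  | symbol :: rest =>
    if nullable.contains symbol then
      (recursive_nulls rest nullable).flatMap (fun next_rhs => [symbol :: next_rhs, next_rhs])
    else
      (recursive_nulls rest nullable).map (fun next_rhs => symbol :: next_rhs)

-- ===== PORT B =====
def recursive_nulls_alt (rhs : List String) (nullable : List String) : List (List String) :=
  rhs.reverse.foldl
    (fun results symbol =>
      results.flatMap (fun r =>
        (symbol :: r) :: (if nullable.contains symbol then [r] else [])))
    [[]]

-- ===== PRECONDITION & SPEC =====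
def Spec_recursive_nulls (rhs : List String) (nullable : List String) (out : List (List String)) : Prop := out = recursive_nulls_alt rhs nullable
instance (rhs : List String) (nullable : List String) (out : List (List String)) : Decidable (Spec_recursive_nulls rhs nullable out) := by unfold Spec_recursive_nulls; infer_instance

-- ===== CLAIM (what is proved, stated in full; the proofs are below) =====
def Claim_equal_recursive_nulls : Prop := ∀ (rhs : List String) (nullable : List String), Dom_recursive_nulls rhs nullable → Spec_recursive_nulls rhs nullable (recursive_nulls rhs nullable)

-- ===== LEMMAS AND PROOFS =====

-- ===== VERDICT (by name: the statement is the Claim_ definition above) =====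
theorem recursive_nulls_spec : Claim_equal_recursive_nulls := by
  intro rhs nullable hd
  clear hd
  unfold Spec_recursive_nulls recursive_nulls_alt
  rw [List.foldl_reverse]
  induction rhs with
  | nil => simp [recursive_nulls]
  | cons s rest ih =>
    simp only [List.foldr_cons, ← ih]
    by_cases h : s ∈ nullable
    · simp [recursive_nulls, h, List.flatMap_def]
    · simp only [recursive_nulls, List.contains_eq_mem, h, decide_false,
        Bool.false_eq_true, if_false]
      exact List.map_eq_flatMap ..
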